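-- pv_equiv track=rewrite | github.com/tirthgoyani11/ScheduleX | backend/core/scheduler/variables.py | _infer_subject_lab_needs
-- ===== SOURCE A (Python) =====
-- def _infer_subject_lab_needs(subject_name: str) -> set[str]:
--     """Return set of compatible lab categories for a subject with lab component."""
--     n = subject_name.lower()
--
--     # Physical science labs
--     if "physics" in n:
--         return {"physics"}
--     if n.startswith("chemistry") and "chemical" not in n:
--         return {"chemistry"}
--
--     # Chemical engineering labs
--     if any(k in n for k in ["chemical", "petroleum", "polymer"]):
--         return {"chemistry_eng"}
--
--     # Mechanical workshops
--     if any(k in n for k in ["workshop", "smithy", "fitting", "welding"]):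
--         return {"mechanical"}
--     if "basic mechanical" in n:
--         return {"mechanical"}
--
--     # Electrical labs
--     if any(k in n for k in ["basic electrical", "electrical machine", "electrical measurement", "power system"]):
--         return {"electrical"}
--
--     # Engineering graphics / CAD
--     if any(k in n for k in ["engineering graphics", "drafting"]):
--         return {"design", "computer"}
--
--     # Electronics-only subjects
--     if any(k in n for k in [
--         "electronic device", "electronic circuit", "digital electronics",
--         "analog communication", "digital communication",
--         "vlsi", "linear integrated", "control system",
--         "wireless communication", "digital signal",
--         "antenna", "network analysis", "basic electronics",
--     ]):
--         return {"electronics"}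
--
--     # Subjects that could use electronics OR computer labs
--     if any(k in n for k in ["digital logic", "digital system", "microprocessor", "microcontroller", "embedded"]):
--         return {"electronics", "computer"}
--
--     # Robotics
--     if "robotics" in n:
--         return {"robotics", "computer"}
--
--     # Networking subjects
--     if any(k in n for k in ["computer network", "networking"]):
--         return {"computer", "networking"}
--
--     # IoT
--     if "iot" in n or "internet of things" in n:
--         return {"computer", "iot"}
--
--     # Default: computer lab (programming, DS, algorithms, web, DB, AI, ML, etc.)
--     return {"computer"}
-- ===== SOURCE B (Python) =====
-- # Different algorithm: instead of an ordered first-match if-chain with early exit,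
-- # collect EVERY matching entry of one flat keyword table and select the one with
-- # the lowest priority number via min().
-- _TABLE = [
--     # (keyword, match_as_prefix, priority, labs)
--     ("physics", False, 0, ("physics",)),
--     ("chemical", False, 1, ("chemistry_eng",)),
--     ("chemistry", True, 2, ("chemistry",)),
--     ("petroleum", False, 3, ("chemistry_eng",)),
--     ("polymer", False, 3, ("chemistry_eng",)),
--     ("workshop", False, 4, ("mechanical",)),
--     ("smithy", False, 4, ("mechanical",)),
--     ("fitting", False, 4, ("mechanical",)),
--     ("welding", False, 4, ("mechanical",)),
--     ("basic mechanical", False, 4, ("mechanical",)),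
--     ("basic electrical", False, 5, ("electrical",)),
--     ("electrical machine", False, 5, ("electrical",)),
--     ("electrical measurement", False, 5, ("electrical",)),
--     ("power system", False, 5, ("electrical",)),
--     ("engineering graphics", False, 6, ("design", "computer")),
--     ("drafting", False, 6, ("design", "computer")),
--     ("electronic device", False, 7, ("electronics",)),
--     ("electronic circuit", False, 7, ("electronics",)),
--     ("digital electronics", False, 7, ("electronics",)),
--     ("analog communication", False, 7, ("electronics",)),
--     ("digital communication", False, 7, ("electronics",)),
--     ("vlsi", False, 7, ("electronics",)),
--     ("linear integrated", False, 7, ("electronics",)),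
--     ("control system", False, 7, ("electronics",)),
--     ("wireless communication", False, 7, ("electronics",)),
--     ("digital signal", False, 7, ("electronics",)),
--     ("antenna", False, 7, ("electronics",)),
--     ("network analysis", False, 7, ("electronics",)),
--     ("basic electronics", False, 7, ("electronics",)),
--     ("digital logic", False, 8, ("electronics", "computer")),
--     ("digital system", False, 8, ("electronics", "computer")),
--     ("microprocessor", False, 8, ("electronics", "computer")),
--     ("microcontroller", False, 8, ("electronics", "computer")),
--     ("embedded", False, 8, ("electronics", "computer")),
--     ("robotics", False, 9, ("robotics", "computer")),
--     ("computer network", False, 10, ("computer", "networking")),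
--     ("networking", False, 10, ("computer", "networking")),
--     ("iot", False, 11, ("computer", "iot")),
--     ("internet of things", False, 11, ("computer", "iot")),
-- ]
--
--
-- def _infer_subject_lab_needs(subject_name: str) -> set[str]:
--     n = subject_name.lower()
--     matches = [(prio, labs) for key, pref, prio, labs in _TABLE
--                if (n.startswith(key) if pref else key in n)]
--     return set(min(matches, key=lambda m: m[0], default=(99, ("computer",)))[1])
-- ===== Notes on version B (the rewrite author's own statement) =====
-- stated objective: alternative
-- what changed: Replaces the short-circuiting ordered if-chain by collect-then-select: one flat keyword table with priorities is fully scanned, every matching entry is collected, and min() by priority picks the winner (default computer); the chemistry prefix test and its negated guard are encoded purely by the priority ordering of the table.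
import Mathlib
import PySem

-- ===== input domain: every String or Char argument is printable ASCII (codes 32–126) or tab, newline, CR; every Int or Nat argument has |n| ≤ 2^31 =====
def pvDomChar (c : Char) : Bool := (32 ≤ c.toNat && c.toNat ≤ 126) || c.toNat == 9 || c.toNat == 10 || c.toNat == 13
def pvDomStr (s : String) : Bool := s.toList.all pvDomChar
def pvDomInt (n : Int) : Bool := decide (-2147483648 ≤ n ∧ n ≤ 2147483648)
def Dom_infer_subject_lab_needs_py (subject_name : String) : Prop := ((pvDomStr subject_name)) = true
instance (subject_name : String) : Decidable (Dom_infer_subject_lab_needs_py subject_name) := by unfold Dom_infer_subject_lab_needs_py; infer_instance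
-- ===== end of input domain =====

-- B replaces A's short-circuiting if-chain by collect-then-select over one flat
-- priority-ordered keyword table: all matching entries are collected and min-by-
-- priority picks the winner (objective: alternative algorithm, same cost).


-- ===== PORT A =====
-- literal transliteration of A's if-chain; sets are lists of distinct strings
def infer_subject_lab_needs_py (subject_name : String) : List String :=
  let n := PySem.Str.lower subject_name
  if PySem.Str.isIn "physics" n then ["physics"]
  else if PySem.Str.startswith n "chemistry" && !(PySem.Str.isIn "chemical" n) then ["chemistry"]
  else if (["chemical", "petroleum", "polymer"]).any (fun k => PySem.Str.isIn k n) then ["chemistry_eng"]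
  else if (["workshop", "smithy", "fitting", "welding"]).any (fun k => PySem.Str.isIn k n) then ["mechanical"]
  else if PySem.Str.isIn "basic mechanical" n then ["mechanical"]
  else if (["basic electrical", "electrical machine", "electrical measurement", "power system"]).any (fun k => PySem.Str.isIn k n) then ["electrical"]
  else if (["engineering graphics", "drafting"]).any (fun k => PySem.Str.isIn k n) then ["design", "computer"]
  else if (["electronic device", "electronic circuit", "digital electronics",
      "analog communication", "digital communication",
      "vlsi", "linear integrated", "control system",
      "wireless communication", "digital signal",
      "antenna", "network analysis", "basic electronics"]).any (fun k => PySem.Str.isIn k n) then ["electronics"]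
  else if (["digital logic", "digital system", "microprocessor", "microcontroller", "embedded"]).any (fun k => PySem.Str.isIn k n) then ["electronics", "computer"]
  else if PySem.Str.isIn "robotics" n then ["robotics", "computer"]
  else if (["computer network", "networking"]).any (fun k => PySem.Str.isIn k n) then ["computer", "networking"]
  else if PySem.Str.isIn "iot" n || PySem.Str.isIn "internet of things" n then ["computer", "iot"]
  else ["computer"]

-- ===== PORT B =====
-- Source B's flat table: (keyword, match_as_prefix, priority, labs)
def pvTable : List (String × Bool × Int × List String) := [
  ("physics", false, 0, ["physics"]),
  ("chemical", false, 1, ["chemistry_eng"]),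
  ("chemistry", true, 2, ["chemistry"]),
  ("petroleum", false, 3, ["chemistry_eng"]),
  ("polymer", false, 3, ["chemistry_eng"]),
  ("workshop", false, 4, ["mechanical"]),
  ("smithy", false, 4, ["mechanical"]),
  ("fitting", false, 4, ["mechanical"]),
  ("welding", false, 4, ["mechanical"]),
  ("basic mechanical", false, 4, ["mechanical"]),
  ("basic electrical", false, 5, ["electrical"]),
  ("electrical machine", false, 5, ["electrical"]),
  ("electrical measurement", false, 5, ["electrical"]),
  ("power system", false, 5, ["electrical"]),
  ("engineering graphics", false, 6, ["design", "computer"]),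
  ("drafting", false, 6, ["design", "computer"]),
  ("electronic device", false, 7, ["electronics"]),
  ("electronic circuit", false, 7, ["electronics"]),
  ("digital electronics", false, 7, ["electronics"]),
  ("analog communication", false, 7, ["electronics"]),
  ("digital communication", false, 7, ["electronics"]),
  ("vlsi", false, 7, ["electronics"]),
  ("linear integrated", false, 7, ["electronics"]),
  ("control system", false, 7, ["electronics"]),
  ("wireless communication", false, 7, ["electronics"]),
  ("digital signal", false, 7, ["electronics"]),
  ("antenna", false, 7, ["electronics"]),
  ("network analysis", false, 7, ["electronics"]),
  ("basic electronics", false, 7, ["electronics"]),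
  ("digital logic", false, 8, ["electronics", "computer"]),
  ("digital system", false, 8, ["electronics", "computer"]),
  ("microprocessor", false, 8, ["electronics", "computer"]),
  ("microcontroller", false, 8, ["electronics", "computer"]),
  ("embedded", false, 8, ["electronics", "computer"]),
  ("robotics", false, 9, ["robotics", "computer"]),
  ("computer network", false, 10, ["computer", "networking"]),
  ("networking", false, 10, ["computer", "networking"]),
  ("iot", false, 11, ["computer", "iot"]),
  ("internet of things", false, 11, ["computer", "iot"])]

-- Python's min(matches, key=lambda m: m[0], default=(99, ("computer",))):
-- first element with strictly smallest first component, or the default on []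
def pvMinKey : List (Int × List String) → Int × List String
  | [] => (99, ["computer"])
  | x :: xs => xs.foldl (fun best y => if y.1 < best.1 then y else best) x

def infer_subject_lab_needs_py_alt (subject_name : String) : List String :=
  let n := PySem.Str.lower subject_name
  let found := (pvTable.filter
    (fun e => if e.2.1 then PySem.Str.startswith n e.1 else PySem.Str.isIn e.1 n)).map
    (fun e => e.2.2)
  (pvMinKey found).2

-- ===== PRECONDITION & SPEC =====
def Spec_infer_subject_lab_needs_py (subject_name : String) (out : List String) : Prop := out = infer_subject_lab_needs_py_alt subject_name
instance (subject_name : String) (out : List String) : Decidable (Spec_infer_subject_lab_needs_py subject_name out) := by unfold Spec_infer_subject_lab_needs_py; infer_instance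

-- ===== CLAIM (what is proved, stated in full; the proofs are below) =====
def Claim_equal_infer_subject_lab_needs_py : Prop := ∀ (subject_name : String), Dom_infer_subject_lab_needs_py subject_name → Spec_infer_subject_lab_needs_py subject_name (infer_subject_lab_needs_py subject_name)


-- ===== LEMMAS AND PROOFS =====

-- the min-fold keeps its start value when nothing later is strictly smaller
theorem pvFold_keep (a : Int × List String) (l : List (Int × List String))
    (h : ∀ y ∈ l, a.1 ≤ y.1) :
    l.foldl (fun best y => if y.1 < best.1 then y else best) a = a := by
  induction l with
  | nil => rfl
  | cons y ys ih =>
      have hy : ¬ y.1 < a.1 := not_lt.mpr (h y (List.mem_cons_self))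
      simp only [List.foldl_cons, if_neg hy]
      exact ih (fun z hz => h z (List.mem_cons_of_mem _ hz))

-- on a priority-sorted list, min-by-priority is the head
theorem pvMinKey_sorted (l : List (Int × List String))
    (h : l.Pairwise (fun a b => a.1 ≤ b.1)) :
    pvMinKey l = l.headD (99, ["computer"]) := by
  cases l with
  | nil => rfl
  | cons x xs =>
      simp only [pvMinKey, List.headD_cons]
      exact pvFold_keep x xs (List.pairwise_cons.mp h).1

-- B = "labs of the first matching table entry, or computer"
theorem pv_alt_firstMatch (subject_name : String) :
    infer_subject_lab_needs_py_alt subject_name =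
      ((pvTable.find? (fun e =>
          if e.2.1 then PySem.Str.startswith (PySem.Str.lower subject_name) e.1
          else PySem.Str.isIn e.1 (PySem.Str.lower subject_name))).map
        (fun e => e.2.2.2)).getD ["computer"] := by
  have hsorted : pvTable.Pairwise (fun a b => a.2.2.1 ≤ b.2.2.1) := by decide
  have hpw : ((pvTable.filter (fun e =>
      if e.2.1 then PySem.Str.startswith (PySem.Str.lower subject_name) e.1
      else PySem.Str.isIn e.1 (PySem.Str.lower subject_name))).map
        (fun e => e.2.2)).Pairwise (fun a b : Int × List String => a.1 ≤ b.1) :=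
    List.pairwise_map.mpr (List.Pairwise.sublist List.filter_sublist hsorted)
  have halt : infer_subject_lab_needs_py_alt subject_name =
      (pvMinKey ((pvTable.filter (fun e =>
        if e.2.1 then PySem.Str.startswith (PySem.Str.lower subject_name) e.1
        else PySem.Str.isIn e.1 (PySem.Str.lower subject_name))).map (fun e => e.2.2))).2 := rfl
  rw [halt, pvMinKey_sorted _ hpw, List.headD_eq_head?_getD, List.head?_map,
    List.head?_filter]
  cases List.find? (fun e =>
      if e.2.1 then PySem.Str.startswith (PySem.Str.lower subject_name) e.1
      else PySem.Str.isIn e.1 (PySem.Str.lower subject_name)) pvTable <;> rfl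

set_option maxRecDepth 8000 in
theorem pv_chains_eq (subject_name : String) :
    infer_subject_lab_needs_py subject_name = infer_subject_lab_needs_py_alt subject_name := by
  rw [pv_alt_firstMatch]
  unfold infer_subject_lab_needs_py pvTable
  simp only [PySem.Str.isIn_eq, PySem.Str.startswith_eq, PySem.Str.toList_lower]
  cases h0 : PySem.Chars.isIn ['p', 'h', 'y', 's', 'i', 'c', 's'] (PySem.Chars.lower subject_name.toList) <;> simp [List.find?, h0] <;>
    cases h1 : PySem.Chars.isIn ['c', 'h', 'e', 'm', 'i', 'c', 'a', 'l'] (PySem.Chars.lower subject_name.toList) <;> simp [List.find?, h1] <;>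
    cases h2 : PySem.Chars.startswith (PySem.Chars.lower subject_name.toList) ['c', 'h', 'e', 'm', 'i', 's', 't', 'r', 'y'] <;> simp [List.find?, h2] <;>
    cases h3 : PySem.Chars.isIn ['p', 'e', 't', 'r', 'o', 'l', 'e', 'u', 'm'] (PySem.Chars.lower subject_name.toList) <;> simp [List.find?, h3] <;>
    cases h4 : PySem.Chars.isIn ['p', 'o', 'l', 'y', 'm', 'e', 'r'] (PySem.Chars.lower subject_name.toList) <;> simp [List.find?, h4] <;>
    cases h5 : PySem.Chars.isIn ['w', 'o', 'r', 'k', 's', 'h', 'o', 'p'] (PySem.Chars.lower subject_name.toList) <;> simp [List.find?, h5] <;>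
    cases h6 : PySem.Chars.isIn ['s', 'm', 'i', 't', 'h', 'y'] (PySem.Chars.lower subject_name.toList) <;> simp [List.find?, h6] <;>
    cases h7 : PySem.Chars.isIn ['f', 'i', 't', 't', 'i', 'n', 'g'] (PySem.Chars.lower subject_name.toList) <;> simp [List.find?, h7] <;>
    cases h8 : PySem.Chars.isIn ['w', 'e', 'l', 'd', 'i', 'n', 'g'] (PySem.Chars.lower subject_name.toList) <;> simp [List.find?, h8] <;>
    cases h9 : PySem.Chars.isIn ['b', 'a', 's', 'i', 'c', ' ', 'm', 'e', 'c', 'h', 'a', 'n', 'i', 'c', 'a', 'l'] (PySem.Chars.lower subject_name.toList) <;> simp [List.find?, h9] <;>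
    cases h10 : PySem.Chars.isIn ['b', 'a', 's', 'i', 'c', ' ', 'e', 'l', 'e', 'c', 't', 'r', 'i', 'c', 'a', 'l'] (PySem.Chars.lower subject_name.toList) <;> simp [List.find?, h10] <;>
    cases h11 : PySem.Chars.isIn ['e', 'l', 'e', 'c', 't', 'r', 'i', 'c', 'a', 'l', ' ', 'm', 'a', 'c', 'h', 'i', 'n', 'e'] (PySem.Chars.lower subject_name.toList) <;> simp [List.find?, h11] <;>
    cases h12 : PySem.Chars.isIn ['e', 'l', 'e', 'c', 't', 'r', 'i', 'c', 'a', 'l', ' ', 'm', 'e', 'a', 's', 'u', 'r', 'e', 'm', 'e', 'n', 't'] (PySem.Chars.lower subject_name.toList) <;> simp [List.find?, h12] <;>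
    cases h13 : PySem.Chars.isIn ['p', 'o', 'w', 'e', 'r', ' ', 's', 'y', 's', 't', 'e', 'm'] (PySem.Chars.lower subject_name.toList) <;> simp [List.find?, h13] <;>
    cases h14 : PySem.Chars.isIn ['e', 'n', 'g', 'i', 'n', 'e', 'e', 'r', 'i', 'n', 'g', ' ', 'g', 'r', 'a', 'p', 'h', 'i', 'c', 's'] (PySem.Chars.lower subject_name.toList) <;> simp [List.find?, h14] <;>
    cases h15 : PySem.Chars.isIn ['d', 'r', 'a', 'f', 't', 'i', 'n', 'g'] (PySem.Chars.lower subject_name.toList) <;> simp [List.find?, h15] <;>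
    cases h16 : PySem.Chars.isIn ['e', 'l', 'e', 'c', 't', 'r', 'o', 'n', 'i', 'c', ' ', 'd', 'e', 'v', 'i', 'c', 'e'] (PySem.Chars.lower subject_name.toList) <;> simp [List.find?, h16] <;>
    cases h17 : PySem.Chars.isIn ['e', 'l', 'e', 'c', 't', 'r', 'o', 'n', 'i', 'c', ' ', 'c', 'i', 'r', 'c', 'u', 'i', 't'] (PySem.Chars.lower subject_name.toList) <;> simp [List.find?, h17] <;>
    cases h18 : PySem.Chars.isIn ['d', 'i', 'g', 'i', 't', 'a', 'l', ' ', 'e', 'l', 'e', 'c', 't', 'r', 'o', 'n', 'i', 'c', 's'] (PySem.Chars.lower subject_name.toList) <;> simp [List.find?, h18] <;>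
    cases h19 : PySem.Chars.isIn ['a', 'n', 'a', 'l', 'o', 'g', ' ', 'c', 'o', 'm', 'm', 'u', 'n', 'i', 'c', 'a', 't', 'i', 'o', 'n'] (PySem.Chars.lower subject_name.toList) <;> simp [List.find?, h19] <;>
    cases h20 : PySem.Chars.isIn ['d', 'i', 'g', 'i', 't', 'a', 'l', ' ', 'c', 'o', 'm', 'm', 'u', 'n', 'i', 'c', 'a', 't', 'i', 'o', 'n'] (PySem.Chars.lower subject_name.toList) <;> simp [List.find?, h20] <;>
    cases h21 : PySem.Chars.isIn ['v', 'l', 's', 'i'] (PySem.Chars.lower subject_name.toList) <;> simp [List.find?, h21] <;>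
    cases h22 : PySem.Chars.isIn ['l', 'i', 'n', 'e', 'a', 'r', ' ', 'i', 'n', 't', 'e', 'g', 'r', 'a', 't', 'e', 'd'] (PySem.Chars.lower subject_name.toList) <;> simp [List.find?, h22] <;>
    cases h23 : PySem.Chars.isIn ['c', 'o', 'n', 't', 'r', 'o', 'l', ' ', 's', 'y', 's', 't', 'e', 'm'] (PySem.Chars.lower subject_name.toList) <;> simp [List.find?, h23] <;>
    cases h24 : PySem.Chars.isIn ['w', 'i', 'r', 'e', 'l', 'e', 's', 's', ' ', 'c', 'o', 'm', 'm', 'u', 'n', 'i', 'c', 'a', 't', 'i', 'o', 'n'] (PySem.Chars.lower subject_name.toList) <;> simp [List.find?, h24] <;>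
    cases h25 : PySem.Chars.isIn ['d', 'i', 'g', 'i', 't', 'a', 'l', ' ', 's', 'i', 'g', 'n', 'a', 'l'] (PySem.Chars.lower subject_name.toList) <;> simp [List.find?, h25] <;>
    cases h26 : PySem.Chars.isIn ['a', 'n', 't', 'e', 'n', 'n', 'a'] (PySem.Chars.lower subject_name.toList) <;> simp [List.find?, h26] <;>
    cases h27 : PySem.Chars.isIn ['n', 'e', 't', 'w', 'o', 'r', 'k', ' ', 'a', 'n', 'a', 'l', 'y', 's', 'i', 's'] (PySem.Chars.lower subject_name.toList) <;> simp [List.find?, h27] <;>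
    cases h28 : PySem.Chars.isIn ['b', 'a', 's', 'i', 'c', ' ', 'e', 'l', 'e', 'c', 't', 'r', 'o', 'n', 'i', 'c', 's'] (PySem.Chars.lower subject_name.toList) <;> simp [List.find?, h28] <;>
    cases h29 : PySem.Chars.isIn ['d', 'i', 'g', 'i', 't', 'a', 'l', ' ', 'l', 'o', 'g', 'i', 'c'] (PySem.Chars.lower subject_name.toList) <;> simp [List.find?, h29] <;>
    cases h30 : PySem.Chars.isIn ['d', 'i', 'g', 'i', 't', 'a', 'l', ' ', 's', 'y', 's', 't', 'e', 'm'] (PySem.Chars.lower subject_name.toList) <;> simp [List.find?, h30] <;>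
    cases h31 : PySem.Chars.isIn ['m', 'i', 'c', 'r', 'o', 'p', 'r', 'o', 'c', 'e', 's', 's', 'o', 'r'] (PySem.Chars.lower subject_name.toList) <;> simp [List.find?, h31] <;>
    cases h32 : PySem.Chars.isIn ['m', 'i', 'c', 'r', 'o', 'c', 'o', 'n', 't', 'r', 'o', 'l', 'l', 'e', 'r'] (PySem.Chars.lower subject_name.toList) <;> simp [List.find?, h32] <;>
    cases h33 : PySem.Chars.isIn ['e', 'm', 'b', 'e', 'd', 'd', 'e', 'd'] (PySem.Chars.lower subject_name.toList) <;> simp [List.find?, h33] <;>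
    cases h34 : PySem.Chars.isIn ['r', 'o', 'b', 'o', 't', 'i', 'c', 's'] (PySem.Chars.lower subject_name.toList) <;> simp [List.find?, h34] <;>
    cases h35 : PySem.Chars.isIn ['c', 'o', 'm', 'p', 'u', 't', 'e', 'r', ' ', 'n', 'e', 't', 'w', 'o', 'r', 'k'] (PySem.Chars.lower subject_name.toList) <;> simp [List.find?, h35] <;>
    cases h36 : PySem.Chars.isIn ['n', 'e', 't', 'w', 'o', 'r', 'k', 'i', 'n', 'g'] (PySem.Chars.lower subject_name.toList) <;> simp [List.find?, h36] <;>
    cases h37 : PySem.Chars.isIn ['i', 'o', 't'] (PySem.Chars.lower subject_name.toList) <;> simp [List.find?, h37] <;>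
    cases h38 : PySem.Chars.isIn ['i', 'n', 't', 'e', 'r', 'n', 'e', 't', ' ', 'o', 'f', ' ', 't', 'h', 'i', 'n', 'g', 's'] (PySem.Chars.lower subject_name.toList) <;> simp [List.find?, h38]

-- ===== VERDICT (by name: the statement is the Claim_ definition above) =====
theorem infer_subject_lab_needs_py_spec : Claim_equal_infer_subject_lab_needs_py := by
  intro s _
  unfold Spec_infer_subject_lab_needs_py
  exact pv_chains_eq s
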